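-- pv_equiv track=rewrite | github.com/r0f1/adventofcode2025 | day03/main.py | get_best_idx
-- ===== SOURCE A (Python) =====
-- from operator import itemgetter
--
-- def get_best_idx(digits, bounds, selected):
--     while True:
--         lb, ub = bounds[-1]
--
--         dig = [(i, d) for i, d in enumerate(digits) if not selected[i] and i >= lb and i < ub]
--
--         if len(dig) == 0:
--             bounds.pop()
--             return get_best_idx(digits, bounds, selected)
--         break
--
--     idx, _ = max(dig, key=itemgetter(1))
--     selected[idx] = 1
--     return idx
-- ===== SOURCE B (Python) =====
-- # Two-stage re-implementation: scan only the clamped window [lo,hi) instead of all of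
-- # enumerate(digits); first compute the max unselected value in the window, then take
-- # the first index attaining it.  Same mutations as A (pops exhausted windows off
-- # `bounds`, sets selected[idx] = 1); the proved equivalence is about the return value.
-- def get_best_idx(digits, bounds, selected):
--     n = len(digits)
--     while True:
--         lb, ub = bounds[-1]
--         lo, hi = max(lb, 0), min(ub, n)
--         cand = [digits[i] for i in range(lo, hi) if not selected[i]]
--         if cand:
--             break
--         bounds.pop()
--     bestv = max(cand)
--     idx = next(i for i in range(lo, hi) if not selected[i] and digits[i] == bestv)
--     selected[idx] = 1
--     return idx
-- ===== Notes on version B (the rewrite author's own statement) =====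
-- stated objective: alternative
-- what changed: A's tail recursion over enumerate(digits) building (index,digit) pairs and taking max(..., key=itemgetter(1)) is replaced by an iterative pop loop that scans only the clamped window range(lo,hi) and works in two stages: collect the unselected values, take their max, then return the first window index attaining it.
import Mathlib
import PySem

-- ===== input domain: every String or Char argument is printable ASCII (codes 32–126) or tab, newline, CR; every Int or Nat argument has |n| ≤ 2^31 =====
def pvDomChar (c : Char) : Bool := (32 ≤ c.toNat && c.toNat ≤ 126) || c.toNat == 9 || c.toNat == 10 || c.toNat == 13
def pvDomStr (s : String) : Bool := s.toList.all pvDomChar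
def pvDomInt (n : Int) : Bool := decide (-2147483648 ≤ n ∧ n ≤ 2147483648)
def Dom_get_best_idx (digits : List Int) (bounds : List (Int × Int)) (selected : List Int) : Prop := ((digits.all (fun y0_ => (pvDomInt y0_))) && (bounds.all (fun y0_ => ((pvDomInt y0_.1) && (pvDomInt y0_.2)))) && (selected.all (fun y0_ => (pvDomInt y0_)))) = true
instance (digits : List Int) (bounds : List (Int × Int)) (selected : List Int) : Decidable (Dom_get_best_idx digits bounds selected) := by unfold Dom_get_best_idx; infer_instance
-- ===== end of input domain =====

-- B replaces A's recursion + enumerate-filter + max(key=itemgetter(1)) by an iterative pop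
-- loop scanning only the clamped window [lo,hi) in two stages: max value first, then the
-- first unselected index attaining it; both Pythons mutate bounds/selected identically and
-- the equivalence proved is about the return value.


-- ===== PORT A =====
-- A recurses after popping bounds; bounds[-1] is the head of the reversed list, so the
-- recursion is structural on bounds.reverse.  bounds[-1] on an empty list and selected[i]
-- out of range are IndexErrors (excluded by Pre_); the port returns junk 0 / default 1 there.
def getBestA (digits : List Int) (selected : List Int) : List (Int × Int) → Int
  | [] => 0  -- bounds[-1] on empty bounds: IndexError, outside Pre_
  | (lb, ub) :: rest =>
    -- dig = [(i, d) for i, d in enumerate(digits) if not selected[i] and i >= lb and i < ub]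
    let dig := (PySem.List.enumerate digits).filter
      (fun p => decide (PySem.List.pyGetD selected p.1 1 = 0 ∧ lb ≤ p.1 ∧ p.1 < ub))
    if dig.length = 0 then
      getBestA digits selected rest          -- bounds.pop(); return get_best_idx(...)
    else
      match PySem.List.max? dig (fun p => p.2) with   -- max(dig, key=itemgetter(1)), first max
      | some q => q.1
      | none => 0  -- unreachable: dig ≠ []

def get_best_idx (digits : List Int) (bounds : List (Int × Int)) (selected : List Int) : Int :=
  getBestA digits selected bounds.reverse

-- ===== PORT B =====
-- Source B's `while True: ... bounds.pop()` loop, as structural recursion on the reversed bounds;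
-- cand and the two-stage max-value / first-index computation are transcribed one to one.
def getBestB (digits : List Int) (selected : List Int) : List (Int × Int) → Int
  | [] => 0  -- bounds[-1] on empty bounds: IndexError, outside Pre_
  | (lb, ub) :: rest =>
    let lo := max lb 0
    let hi := min ub (PySem.List.len digits)
    -- cand = [digits[i] for i in range(lo, hi) if not selected[i]]
    let cand := (PySem.List.pyRange lo hi).filterMap
      (fun i => if PySem.List.pyGetD selected i 1 = 0
                then some (PySem.List.pyGetD digits i 0) else none)
    if cand = [] then
      getBestB digits selected rest          -- bounds.pop(); continue the while loop
    else
      match PySem.List.max? cand (fun x => x) with   -- bestv = max(cand)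
      | none => 0  -- unreachable: cand ≠ []
      | some bestv =>
        -- idx = next(i for i in range(lo, hi) if not selected[i] and digits[i] == bestv)
        match (PySem.List.pyRange lo hi).find?
            (fun i => decide (PySem.List.pyGetD selected i 1 = 0) &&
                      decide (PySem.List.pyGetD digits i 0 = bestv)) with
        | some idx => idx
        | none => 0  -- unreachable: bestv is attained

def get_best_idx_alt (digits : List Int) (bounds : List (Int × Int)) (selected : List Int) : Int :=
  getBestB digits selected bounds.reverse

-- ===== PRECONDITION & SPEC =====
-- Pre_ is exactly where the Python A returns: selected must cover every index of digits
-- (A reads selected[i] for every i) and some window must contain an unselected index;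
-- otherwise A raises IndexError (from selected[i] or from bounds[-1] on emptied bounds).
def Pre_get_best_idx (digits : List Int) (bounds : List (Int × Int)) (selected : List Int) : Prop :=
  digits.length ≤ selected.length ∧
  ∃ q ∈ bounds, ∃ i ∈ List.range digits.length,
    selected.getD i 1 = 0 ∧ q.1 ≤ (i : Int) ∧ (i : Int) < q.2
instance (digits : List Int) (bounds : List (Int × Int)) (selected : List Int) : Decidable (Pre_get_best_idx digits bounds selected) := by unfold Pre_get_best_idx; infer_instance

def pvWitness_get_best_idx : List Int × (List (Int × Int)) × List Int := ([5, 3], [(0, 2)], [0, 0])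

def Spec_get_best_idx (digits : List Int) (bounds : List (Int × Int)) (selected : List Int) (out : Int) : Prop := out = get_best_idx_alt digits bounds selected
instance (digits : List Int) (bounds : List (Int × Int)) (selected : List Int) (out : Int) : Decidable (Spec_get_best_idx digits bounds selected out) := by unfold Spec_get_best_idx; infer_instance

-- ===== CLAIM (what is proved, stated in full; the proofs are below) =====
def Claim_equal_get_best_idx : Prop := ∀ (digits : List Int) (bounds : List (Int × Int)) (selected : List Int), Dom_get_best_idx digits bounds selected → Pre_get_best_idx digits bounds selected → Spec_get_best_idx digits bounds selected (get_best_idx digits bounds selected)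

-- ===== LEMMAS AND PROOFS =====

-- '[g(i) for i in l if p(i)]' as filterMap equals filter-then-map
lemma filterMap_ite_eq_map_filter {α β : Type} (p : α → Prop) [DecidablePred p] (g : α → β) :
    ∀ l : List α, l.filterMap (fun i => if p i then some (g i) else none)
      = (l.filter (fun i => decide (p i))).map g := by
  intro l
  induction l with
  | nil => rfl
  | cons x t ih =>
    by_cases hx : p x
    · simp [hx, ih]
    · simp [hx, ih]

-- restricting the full-range interval filter to the clamped window
lemma filter_range_clamp (sel : Int → Bool) (lb ub n : Int) :
    (PySem.List.pyRange 0 n).filter (fun j => sel j && decide (lb ≤ j ∧ j < ub))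
      = (PySem.List.pyRange (max lb 0) (min ub n)).filter sel := by
  set lo := max lb 0 with hlo
  set hi := min ub n with hhi
  by_cases hlh : lo ≤ hi
  · have h0lo : (0:Int) ≤ lo := le_max_right _ _
    have hhin : hi ≤ n := min_le_right _ _
    rw [PySem.List.pyRange_one_append 0 lo n h0lo (le_trans hlh hhin),
        PySem.List.pyRange_one_append lo hi n hlh hhin, List.filter_append, List.filter_append]
    have h1 : (PySem.List.pyRange 0 lo).filter (fun j => sel j && decide (lb ≤ j ∧ j < ub)) = [] := by
      rw [List.filter_eq_nil_iff]
      intro j hj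
      have := PySem.List.mem_pyRange_one.mp hj
      simp only [Bool.and_eq_true, decide_eq_true_eq]
      rintro ⟨-, h, -⟩; omega
    have h3 : (PySem.List.pyRange hi n).filter (fun j => sel j && decide (lb ≤ j ∧ j < ub)) = [] := by
      rw [List.filter_eq_nil_iff]
      intro j hj
      have := PySem.List.mem_pyRange_one.mp hj
      simp only [Bool.and_eq_true, decide_eq_true_eq]
      rintro ⟨-, -, h⟩; omega
    have h2 : (PySem.List.pyRange lo hi).filter (fun j => sel j && decide (lb ≤ j ∧ j < ub))
        = (PySem.List.pyRange lo hi).filter sel := by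
      apply List.filter_congr
      intro j hj
      have := PySem.List.mem_pyRange_one.mp hj
      have : lb ≤ j ∧ j < ub := by omega
      simp [this]
    rw [h1, h2, h3, List.nil_append, List.append_nil]
  · rw [PySem.List.pyRange_one_eq_nil (a := lo) (b := hi) (by omega), List.filter_nil,
        List.filter_eq_nil_iff]
    intro j hj
    have := PySem.List.mem_pyRange_one.mp hj
    simp only [Bool.and_eq_true, decide_eq_true_eq]
    rintro ⟨-, h, h'⟩; omega

-- the max?-fold step for key snd on pairs, and for the identity key on values
def maxStepP (a : Option (Int × Int)) (x : Int × Int) : Option (Int × Int) :=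
  match a with
  | none => some x
  | some m => if m.2 < x.2 then some x else some m

def maxStepV (a : Option Int) (x : Int) : Option Int :=
  match a with
  | none => some x
  | some m => if m < x then some x else some m

lemma max?_eq_foldl_maxStepP (xs : List (Int × Int)) :
    PySem.List.max? xs (fun p => p.2) = xs.foldl maxStepP none := by
  unfold PySem.List.max?
  apply PySem.List.foldl_congr_mem
  intro acc x _
  cases acc <;> rfl

lemma max?_eq_foldl_maxStepV (xs : List Int) :
    PySem.List.max? xs (fun x => x) = xs.foldl maxStepV none := by
  unfold PySem.List.max?
  apply PySem.List.foldl_congr_mem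
  intro acc x _
  cases acc <;> rfl

-- max over the projected values is the projection of the first max by value
lemma foldl_max_map_snd : ∀ (L : List (Int × Int)) (acc : Option (Int × Int)),
    (L.map Prod.snd).foldl maxStepV (acc.map Prod.snd)
    = (L.foldl maxStepP acc).map Prod.snd := by
  intro L
  induction L with
  | nil => intro acc; rfl
  | cons x t ih =>
    intro acc
    simp only [List.map_cons, List.foldl_cons]
    cases acc with
    | none => exact ih (some x)
    | some m =>
      simp only [Option.map_some, maxStepP, maxStepV]
      by_cases h : m.2 < x.2
      · rw [if_pos h, if_pos h]; exact ih (some x)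
      · rw [if_neg h, if_neg h]; exact ih (some m)

lemma max?_map_snd (L : List (Int × Int)) :
    PySem.List.max? (L.map Prod.snd) (fun x => x)
      = (PySem.List.max? L (fun p => p.2)).map Prod.snd := by
  rw [max?_eq_foldl_maxStepV, max?_eq_foldl_maxStepP]
  exact foldl_max_map_snd L none

-- the running first-max fold lands on the first element attaining the maximal value
lemma maxStepP_first : ∀ (t : List (Int × Int)) (acc : Int × Int),
    ∃ q, t.foldl maxStepP (some acc) = some q ∧
      ((q = acc ∧ ∀ p ∈ t, ¬ acc.2 < p.2) ∨
       (acc.2 < q.2 ∧ t.find? (fun p => decide (p.2 = q.2)) = some q)) := by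
  intro t
  induction t with
  | nil => intro acc; exact ⟨acc, rfl, Or.inl ⟨rfl, by simp⟩⟩
  | cons x t ih =>
    intro acc
    simp only [List.foldl_cons, maxStepP]
    by_cases h : acc.2 < x.2
    · rw [if_pos h]
      obtain ⟨q, hq, hcase⟩ := ih x
      refine ⟨q, hq, Or.inr ?_⟩
      rcases hcase with ⟨rfl, hall⟩ | ⟨hlt, hfind⟩
      · exact ⟨h, by simp⟩
      · refine ⟨by omega, ?_⟩
        simpa [List.find?_cons, show x.2 ≠ q.2 by omega] using hfind
    · rw [if_neg h]
      obtain ⟨q, hq, hcase⟩ := ih acc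
      refine ⟨q, hq, ?_⟩
      rcases hcase with ⟨rfl, hall⟩ | ⟨hlt, hfind⟩
      · exact Or.inl ⟨rfl, by
          intro p hp
          rcases List.mem_cons.mp hp with rfl | hp
          · exact h
          · exact hall p hp⟩
      · refine Or.inr ⟨hlt, ?_⟩
        simpa [List.find?_cons, show x.2 ≠ q.2 by omega] using hfind

-- the first max by value is the first element whose value equals the max
lemma find?_of_max? (L : List (Int × Int)) (q : Int × Int)
    (h : PySem.List.max? L (fun p => p.2) = some q) :
    L.find? (fun p => decide (p.2 = q.2)) = some q := by
  cases L with
  | nil => simp [PySem.List.max?] at h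
  | cons x t =>
    rw [max?_eq_foldl_maxStepP, List.foldl_cons] at h
    have h' : t.foldl maxStepP (some x) = some q := h
    obtain ⟨q', hq', hcase⟩ := maxStepP_first t x
    rw [h'] at hq'
    cases hq'
    rcases hcase with ⟨rfl, -⟩ | ⟨hlt, hfind⟩
    · simp
    · simpa [List.find?_cons, show x.2 ≠ q.2 by omega] using hfind

-- the per-window/per-recursion equivalence of the two ports
lemma getBestA_eq_getBestB (digits selected : List Int) :
    ∀ rb : List (Int × Int), getBestA digits selected rb = getBestB digits selected rb := by
  intro rb
  induction rb with
  | nil => rfl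
  | cons w rest ih =>
    obtain ⟨lb, ub⟩ := w
    simp only [getBestA, getBestB]
    set lo := max lb 0 with hlo
    set hi := min ub (PySem.List.len digits) with hhi
    set f : Int → Int × Int := fun j => (j, PySem.List.pyGetD digits j 0) with hf
    set sb : Int → Bool := fun i => decide (PySem.List.pyGetD selected i 1 = 0) with hsb
    set Ifil := (PySem.List.pyRange lo hi).filter sb with hIfil
    have hdig : (PySem.List.enumerate digits).filter
        (fun p => decide (PySem.List.pyGetD selected p.1 1 = 0 ∧ lb ≤ p.1 ∧ p.1 < ub))
        = Ifil.map f := by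
      rw [PySem.List.enumerate_eq_map_pyRange digits 0, List.filter_map]
      have : ((fun p : Int × Int =>
          decide (PySem.List.pyGetD selected p.1 1 = 0 ∧ lb ≤ p.1 ∧ p.1 < ub)) ∘ f)
          = fun j => sb j && decide (lb ≤ j ∧ j < ub) := by
        funext j
        by_cases h1 : PySem.List.pyGetD selected j 1 = 0 <;>
          by_cases h2 : lb ≤ j ∧ j < ub
        · simp [hf, hsb, h1, h2]
        · simp [hf, hsb, h1, h2]; omega
        · simp [hf, hsb, h1, h2]
        · simp [hf, hsb, h1, h2]
      rw [this, filter_range_clamp sb lb ub (PySem.List.len digits), ← hlo, ← hhi, ← hIfil]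
    have hcand : (PySem.List.pyRange lo hi).filterMap
        (fun i => if PySem.List.pyGetD selected i 1 = 0
                  then some (PySem.List.pyGetD digits i 0) else none)
        = Ifil.map (fun i => PySem.List.pyGetD digits i 0) := by
      rw [filterMap_ite_eq_map_filter (fun i => PySem.List.pyGetD selected i 1 = 0)
            (fun i => PySem.List.pyGetD digits i 0) (PySem.List.pyRange lo hi)]
    rw [hdig, hcand]
    by_cases hnil : Ifil = []
    · simp [hnil, ih]
    · rw [if_neg (by simp [hnil]), if_neg (by simp [hnil])]
      have hmapsnd : (Ifil.map f).map Prod.snd = Ifil.map (fun i => PySem.List.pyGetD digits i 0) := by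
        rw [List.map_map]; rfl
      cases hmx : PySem.List.max? (Ifil.map f) (fun p => p.2) with
      | none =>
        exact absurd ((PySem.List.max?_eq_none_iff _ _).mp hmx) (by simp [hnil])
      | some q =>
        have hbest : PySem.List.max? (Ifil.map (fun i => PySem.List.pyGetD digits i 0)) (fun x => x)
            = some q.2 := by
          rw [← hmapsnd, max?_map_snd, hmx]; rfl
        rw [hbest]
        have hfind := find?_of_max? (Ifil.map f) q hmx
        rw [List.find?_map] at hfind
        have hcomp : ((fun p : Int × Int => decide (p.2 = q.2)) ∘ f)
            = fun i => decide (PySem.List.pyGetD digits i 0 = q.2) := by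
          funext i; simp [hf]
        rw [hcomp] at hfind
        have hfil : Ifil.find? (fun i => decide (PySem.List.pyGetD digits i 0 = q.2))
            = (PySem.List.pyRange lo hi).find?
              (fun i => decide (PySem.List.pyGetD selected i 1 = 0) &&
                        decide (PySem.List.pyGetD digits i 0 = q.2)) := by
          rw [hIfil, List.find?_filter]
          congr 1
          funext a
          by_cases h1 : PySem.List.pyGetD selected a 1 = 0 <;>
            by_cases h2 : PySem.List.pyGetD digits a 0 = q.2 <;> simp [hsb, h1, h2]
        obtain ⟨j, hj, hfj⟩ := Option.map_eq_some_iff.mp hfind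
        have hB : (PySem.List.pyRange lo hi).find?
            (fun i => decide (PySem.List.pyGetD selected i 1 = 0) &&
                      decide (PySem.List.pyGetD digits i 0 = q.2)) = some j := by
          rw [← hfil, hj]
        have hjq : j = q.1 := by
          have := congrArg Prod.fst hfj
          simpa [hf] using this
        simp [hB, hjq]

-- ===== VERDICT (by name: the statement is the Claim_ definition above) =====
theorem get_best_idx_spec : Claim_equal_get_best_idx := by
  intro digits bounds selected _ _
  unfold Spec_get_best_idx get_best_idx get_best_idx_alt
  exact getBestA_eq_getBestB digits selected bounds.reverse
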